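-- pv_equiv track=rewrite | github.com/evanking12/mcp-factory | src/discovery/csv_script.py | build_comment_spans
-- ===== SOURCE A (Python) =====
-- from typing import Dict, List, Optional, Tuple
--
-- def build_comment_spans(text: str) -> Tuple[List[Tuple[int, int]], List[int]]:
--     """Build a list of (start, end) character indices for all comments in the text."""
--     spans: List[Tuple[int, int]] = []
--     i = 0
--     n = len(text)
--
--     while i < n:
--         # Single-line comment
--         if text.startswith("//", i):
--             start = i
--             i = text.find("\n", i)
--             if i == -1:
--                 spans.append((start, n))
--                 break
--             spans.append((start, i))
--             continue
--
--         # Multi-line comment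
--         if text.startswith("/*", i):
--             start = i
--             end = text.find("*/", i + 2)
--             if end == -1:
--                 spans.append((start, n))
--                 break
--             spans.append((start, end + 2))
--             i = end + 2
--             continue
--
--         i += 1
--
--     starts = [s for s, _ in spans]
--     return spans, starts
-- ===== SOURCE B (Python) =====
-- def build_comment_spans(text):
--     """Build a list of (start, end) character indices for all comments in the text."""
--     spans = []
--     n = len(text)
--     state = "code"   # "code" | "line" | "block"
--     start = 0
--     i = 0
--     while i < n:
--         c = text[i]
--         if state == "code":
--             if c == "/" and i + 1 < n and text[i + 1] == "/":
--                 state, start = "line", i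
--                 i += 2
--             elif c == "/" and i + 1 < n and text[i + 1] == "*":
--                 state, start = "block", i
--                 i += 2
--             else:
--                 i += 1
--         elif state == "line":
--             if c == "\n":
--                 spans.append((start, i))
--                 state = "code"
--             i += 1
--         else:  # block
--             if c == "*" and i + 1 < n and text[i + 1] == "/":
--                 spans.append((start, i + 2))
--                 state = "code"
--                 i += 2
--             else:
--                 i += 1
--     if state != "code":
--         spans.append((start, n))
--     starts = [s for s, _ in spans]
--     return spans, starts
-- ===== Notes on version B (the rewrite author's own statement) =====
-- stated objective: faster
-- what changed: A rescans with two text.startswith calls at every index and str.find jumps inside the loop; B is a single-pass three-state character state machine (code/line/block) that reads each character once and emits each span when the comment closes (or at end of text).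
import Mathlib
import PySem

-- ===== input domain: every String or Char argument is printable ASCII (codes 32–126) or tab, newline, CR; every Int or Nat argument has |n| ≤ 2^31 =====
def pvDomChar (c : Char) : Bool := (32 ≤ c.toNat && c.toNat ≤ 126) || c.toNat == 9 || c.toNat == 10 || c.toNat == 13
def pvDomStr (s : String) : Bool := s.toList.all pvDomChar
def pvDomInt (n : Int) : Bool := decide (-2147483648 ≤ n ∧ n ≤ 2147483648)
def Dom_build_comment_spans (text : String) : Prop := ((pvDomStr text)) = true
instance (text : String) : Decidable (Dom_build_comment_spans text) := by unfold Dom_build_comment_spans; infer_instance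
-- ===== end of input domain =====

-- B replaces A's rescanning loop (startswith/str.find at each position) with a single-pass
-- three-state character state machine ("code"/"line"/"block"); same O(n) result, one pass, no find calls.

-- ===== PORT A =====
-- port of A: the character-by-character while-loop, as structural recursion on a fuel that
-- bounds the remaining iterations (each iteration moves i forward, so fuel s.length suffices;
-- text.startswith(pat, i) is ported as PySem.Chars.startswith (s.drop i) pat, exact for the
-- Nat index i; text.find(sub, i) is PySem.Chars.findFrom)
def buildLoopA : List Char → Nat → Nat → List (Int × Int) → List (Int × Int)
  | _, 0, _, spans => spans
  | s, fuel + 1, i, spans =>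
    if i < s.length then
      if PySem.Chars.startswith (s.drop i) ['/', '/'] then
        if PySem.Chars.findFrom s ['\n'] (i : Int) = -1 then
          spans ++ [((i : Int), (s.length : Int))]
        else
          buildLoopA s fuel (PySem.Chars.findFrom s ['\n'] (i : Int)).toNat
            (spans ++ [((i : Int), PySem.Chars.findFrom s ['\n'] (i : Int))])
      else if PySem.Chars.startswith (s.drop i) ['/', '*'] then
        if PySem.Chars.findFrom s ['*', '/'] ((i : Int) + 2) = -1 then
          spans ++ [((i : Int), (s.length : Int))]
        else
          buildLoopA s fuel (PySem.Chars.findFrom s ['*', '/'] ((i : Int) + 2) + 2).toNat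
            (spans ++ [((i : Int), PySem.Chars.findFrom s ['*', '/'] ((i : Int) + 2) + 2)])
      else
        buildLoopA s fuel (i + 1) spans
    else spans

def build_comment_spans (text : String) : (List (Int × Int)) × List Int :=
  let spans := buildLoopA text.toList text.toList.length 0 []
  let starts := spans.map (fun p => p.1)
  (spans, starts)

-- ===== PORT B =====
-- port of B: one pass over the characters with a three-valued state (0 = code, 1 = line
-- comment, 2 = block comment) and the start index of the open comment; the while loop
-- reading text[i] (and its one-character lookahead text[i+1]) becomes structural recursion
-- consuming the character list while i counts the absolute position.
def scanB : List Char → Nat → Nat → Int → List (Int × Int) → List (Int × Int)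
  | [], i, state, start, spans =>
      if state = 0 then spans else spans ++ [(start, (i : Int))]
  | c :: rest, i, state, start, spans =>
      if state = 0 then
        match rest with
        | d :: rest2 =>
          if c = '/' ∧ d = '/' then scanB rest2 (i + 2) 1 (i : Int) spans
          else if c = '/' ∧ d = '*' then scanB rest2 (i + 2) 2 (i : Int) spans
          else scanB (d :: rest2) (i + 1) 0 start spans
        | [] => scanB [] (i + 1) 0 start spans
      else if state = 1 then
        if c = '\n' then scanB rest (i + 1) 0 start (spans ++ [(start, (i : Int))])
        else scanB rest (i + 1) 1 start spans
      else
        match rest with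
        | d :: rest2 =>
          if c = '*' ∧ d = '/' then scanB rest2 (i + 2) 0 start (spans ++ [(start, (i : Int) + 2)])
          else scanB (d :: rest2) (i + 1) 2 start spans
        | [] => scanB [] (i + 1) 2 start spans
  termination_by l _ _ _ _ => l.length
  decreasing_by all_goals simp

def build_comment_spans_alt (text : String) : (List (Int × Int)) × List Int :=
  let spans := scanB text.toList 0 0 0 []
  let starts := spans.map (fun p => p.1)
  (spans, starts)

-- ===== PRECONDITION & SPEC =====
def Spec_build_comment_spans (text : String) (out : (List (Int × Int)) × List Int) : Prop := out = build_comment_spans_alt text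
instance (text : String) (out : (List (Int × Int)) × List Int) : Decidable (Spec_build_comment_spans text out) := by unfold Spec_build_comment_spans; infer_instance

-- ===== CLAIM (what is proved, stated in full; the proofs are below) =====
def Claim_equal_build_comment_spans : Prop := ∀ (text : String), Dom_build_comment_spans text → Spec_build_comment_spans text (build_comment_spans text)

-- ===== LEMMAS AND PROOFS =====
theorem pvPrefHeadEq {a b : Char} {p q l : List Char} (h1 : (a :: p) <+: l) (h2 : (b :: q) <+: l) : a = b := by
  obtain ⟨t1, e1⟩ := h1; obtain ⟨t2, e2⟩ := h2
  rw [← e1] at e2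
  exact (by simpa using congrArg List.head? e2 : b = a).symm

theorem pvPrefLtLen {a : Char} {p : List Char} {s : List Char} {k : Nat}
    (h : (a :: p) <+: s.drop k) : k < s.length := by
  obtain ⟨t, e⟩ := h
  have hne : s.drop k ≠ [] := by rw [← e]; simp
  have := List.drop_eq_nil_iff.not.mp hne
  omega

theorem pvPref2Len {a b : Char} {p : List Char} {s : List Char} {k : Nat}
    (h : (a :: b :: p) <+: s.drop k) : k + 2 ≤ s.length := by
  obtain ⟨t, e⟩ := h
  have := congrArg List.length e
  simp [List.length_drop] at this
  omega

-- a pattern occurring (as prefix) at position k ≥ i occurs inside s.drop i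
theorem pvOccMono {sub s : List Char} {i k : Nat} (h : sub <+: s.drop k) (hik : i ≤ k) :
    sub <:+: s.drop i := by
  have hd : s.drop k = (s.drop i).drop (k - i) := by
    rw [List.drop_drop]; congr 1; omega
  rw [hd] at h
  exact h.isInfix.trans (List.drop_suffix _ _).isInfix

-- the line-comment step advances: the '\n' found lies strictly beyond i
theorem pvAdvALine {s : List Char} {i : Nat} (hi : i < s.length)
    (h1 : PySem.Chars.startswith (s.drop i) ['/', '/'] = true)
    (hj : PySem.Chars.findFrom s ['\n'] (i : Int) ≠ -1) :
    i < (PySem.Chars.findFrom s ['\n'] (i : Int)).toNat := by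
  have hk : i ≤ s.length := le_of_lt hi
  obtain ⟨hle, hpre, -⟩ := PySem.Chars.findFrom_natCast_spec s ['\n'] i hk hj
  set j := PySem.Chars.findFrom s ['\n'] (i : Int) with hjdef
  have hj0 : 0 ≤ j := le_trans (Int.natCast_nonneg i) hle
  have hij : i ≤ j.toNat := by omega
  rcases Nat.lt_or_ge i j.toNat with h | h
  · exact h
  · have heq : j.toNat = i := le_antisymm h hij
    rw [heq] at hpre
    have hsw := (PySem.Chars.startswith_iff _ _).mp h1
    exact absurd (pvPrefHeadEq hpre hsw) (by decide)

-- the block-comment step advances: end+2 lies strictly beyond i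
theorem pvAdvABlock {s : List Char} {i : Nat}
    (h2 : PySem.Chars.startswith (s.drop i) ['/', '*'] = true)
    (he : PySem.Chars.findFrom s ['*', '/'] ((i : Int) + 2) ≠ -1) :
    i < (PySem.Chars.findFrom s ['*', '/'] ((i : Int) + 2) + 2).toNat := by
  have hlen : i + 2 ≤ s.length := pvPref2Len ((PySem.Chars.startswith_iff _ _).mp h2)
  have hcast : ((i : Int) + 2) = ((i + 2 : Nat) : Int) := by push_cast; ring
  rw [hcast] at he ⊢
  obtain ⟨hle, -, -⟩ := PySem.Chars.findFrom_natCast_spec s ['*', '/'] (i + 2) hlen he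
  omega

-- past the end A's loop returns the accumulator whatever the fuel
theorem pvLoopATerm (s : List Char) (f i : Nat) (spans : List (Int × Int)) (h : s.length ≤ i) :
    buildLoopA s f i spans = spans := by
  cases f with
  | zero => rfl
  | succ f => rw [buildLoopA]; simp [show ¬ i < s.length by omega]

-- fuel irrelevance: any fuel ≥ the remaining length computes the same result
theorem pvLoopAExt (s : List Char) : ∀ (f1 f2 i : Nat) (spans : List (Int × Int)),
    s.length - i ≤ f1 → s.length - i ≤ f2 → buildLoopA s f1 i spans = buildLoopA s f2 i spans := by
  intro f1
  induction f1 with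
  | zero =>
    intro f2 i spans h1 h2
    rw [pvLoopATerm s 0 i spans (by omega), pvLoopATerm s f2 i spans (by omega)]
  | succ f1 ih =>
    intro f2 i spans h1 h2
    by_cases hi : i < s.length
    · obtain ⟨g2, rfl⟩ : ∃ g, f2 = g + 1 := ⟨f2 - 1, by omega⟩
      rw [buildLoopA, buildLoopA]
      simp only [if_pos hi]
      by_cases hs1 : PySem.Chars.startswith (s.drop i) ['/', '/'] = true
      · simp only [if_pos hs1]
        by_cases hj : PySem.Chars.findFrom s ['\n'] (i : Int) = -1
        · simp only [if_pos hj]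
        · simp only [if_neg hj]
          have := pvAdvALine hi hs1 hj
          exact ih g2 _ _ (by omega) (by omega)
      · simp only [if_neg hs1]
        by_cases hs2 : PySem.Chars.startswith (s.drop i) ['/', '*'] = true
        · simp only [if_pos hs2]
          by_cases he : PySem.Chars.findFrom s ['*', '/'] ((i : Int) + 2) = -1
          · simp only [if_pos he]
          · simp only [if_neg he]
            have := pvAdvABlock hs2 he
            exact ih g2 _ _ (by omega) (by omega)
        · simp only [if_neg hs2]
          exact ih g2 _ _ (by omega) (by omega)
    · rw [pvLoopATerm s _ i spans (by omega), pvLoopATerm s _ i spans (by omega)]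

-- one unfolding of A's loop, with the recursive calls renormalised to fuel s.length
theorem pvLoopAUnfold {s : List Char} {f i : Nat} (spans : List (Int × Int))
    (hi : i < s.length) (hf : s.length - i ≤ f) :
    buildLoopA s f i spans =
      if PySem.Chars.startswith (s.drop i) ['/', '/'] then
        if PySem.Chars.findFrom s ['\n'] (i : Int) = -1 then
          spans ++ [((i : Int), (s.length : Int))]
        else
          buildLoopA s s.length (PySem.Chars.findFrom s ['\n'] (i : Int)).toNat
            (spans ++ [((i : Int), PySem.Chars.findFrom s ['\n'] (i : Int))])
      else if PySem.Chars.startswith (s.drop i) ['/', '*'] then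
        if PySem.Chars.findFrom s ['*', '/'] ((i : Int) + 2) = -1 then
          spans ++ [((i : Int), (s.length : Int))]
        else
          buildLoopA s s.length (PySem.Chars.findFrom s ['*', '/'] ((i : Int) + 2) + 2).toNat
            (spans ++ [((i : Int), PySem.Chars.findFrom s ['*', '/'] ((i : Int) + 2) + 2)])
      else
        buildLoopA s s.length (i + 1) spans := by
  obtain ⟨g, rfl⟩ : ∃ g, f = g + 1 := ⟨f - 1, by omega⟩
  rw [buildLoopA]
  simp only [if_pos hi]
  by_cases hs1 : PySem.Chars.startswith (s.drop i) ['/', '/'] = true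
  · simp only [if_pos hs1]
    by_cases hj : PySem.Chars.findFrom s ['\n'] (i : Int) = -1
    · simp only [if_pos hj]
    · simp only [if_neg hj]
      have := pvAdvALine hi hs1 hj
      exact pvLoopAExt s g s.length _ _ (by omega) (by omega)
  · simp only [if_neg hs1]
    by_cases hs2 : PySem.Chars.startswith (s.drop i) ['/', '*'] = true
    · simp only [if_pos hs2]
      by_cases he : PySem.Chars.findFrom s ['*', '/'] ((i : Int) + 2) = -1
      · simp only [if_pos he]
      · simp only [if_neg he]
        have := pvAdvABlock hs2 he
        exact pvLoopAExt s g s.length _ _ (by omega) (by omega)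
    · simp only [if_neg hs2]
      exact pvLoopAExt s g s.length _ _ (by omega) (by omega)

-- [a] is a prefix of s.drop k iff s[k] = a (for k < length)
theorem pvPref1Iff {s : List Char} {k : Nat} (hk : k < s.length) (a : Char) :
    [a] <+: s.drop k ↔ s[k] = a := by
  rw [List.drop_eq_getElem_cons hk]
  constructor
  · rintro ⟨t, e⟩
    simp only [List.cons_append, List.nil_append, List.cons.injEq] at e
    exact e.1.symm
  · rintro rfl; exact ⟨s.drop (k + 1), rfl⟩

-- [a, b] is a prefix of s.drop k iff s[k] = a and s[k+1] = b (for k+1 < length)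
theorem pvPref2Iff {s : List Char} {k : Nat} (hk : k + 1 < s.length) (a b : Char) :
    [a, b] <+: s.drop k ↔ s[k] = a ∧ s[k + 1] = b := by
  rw [List.drop_eq_getElem_cons (by omega : k < s.length),
      List.drop_eq_getElem_cons hk]
  constructor
  · rintro ⟨t, e⟩
    simp only [List.cons_append, List.nil_append, List.cons.injEq] at e
    exact ⟨e.1.symm, e.2.1.symm⟩
  · rintro ⟨rfl, rfl⟩; exact ⟨s.drop (k + 2), by simp⟩

-- an infix of s.drop k is a prefix of some later drop
theorem pvInfixExPref {sub s : List Char} {k : Nat} (h : sub <:+: s.drop k) :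
    ∃ m, k ≤ m ∧ sub <+: s.drop m := by
  obtain ⟨u, v, e⟩ := h
  refine ⟨k + u.length, by omega, v, ?_⟩
  have : s.drop (k + u.length) = (s.drop k).drop u.length := by
    rw [List.drop_drop]
  rw [this, ← e]
  simp

-- a nonempty pattern prefixed at k is found exactly at k
theorem pvFindAt {s sub : List Char} {k : Nat} (hk : k ≤ s.length)
    (_hne : sub ≠ []) (h : sub <+: s.drop k) :
    PySem.Chars.findFrom s sub (k : Int) = (k : Int) := by
  have hinf : sub <:+: s.drop k := h.isInfix
  have hnz : PySem.Chars.findFrom s sub (k : Int) ≠ -1 := by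
    intro hc
    exact ((PySem.Chars.findFrom_natCast_eq_neg_one_iff s sub k hk).mp hc) hinf
  obtain ⟨hle, hpre, hmin⟩ := PySem.Chars.findFrom_natCast_spec s sub k hk hnz
  set j := PySem.Chars.findFrom s sub (k : Int) with hj
  have hj0 : 0 ≤ j := le_trans (Int.natCast_nonneg k) hle
  rcases Nat.lt_or_ge k j.toNat with hlt | hge
  · exact absurd h (hmin k le_rfl hlt)
  · omega

-- no occurrence at k itself: searching from k is searching from k+1
theorem pvFindStep {s sub : List Char} {k : Nat} (hk : k < s.length)
    (hnp : ¬ sub <+: s.drop k) :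
    PySem.Chars.findFrom s sub (k : Int) = PySem.Chars.findFrom s sub ((k + 1 : Nat) : Int) := by
  have hk1 : k + 1 ≤ s.length := hk
  have hkle : k ≤ s.length := le_of_lt hk
  by_cases h1 : PySem.Chars.findFrom s sub ((k + 1 : Nat) : Int) = -1
  · rw [h1]
    apply (PySem.Chars.findFrom_natCast_eq_neg_one_iff s sub k hkle).mpr
    intro hinf
    obtain ⟨m, hkm, hpre⟩ := pvInfixExPref hinf
    rcases Nat.eq_or_lt_of_le hkm with rfl | hlt
    · exact hnp hpre
    · exact ((PySem.Chars.findFrom_natCast_eq_neg_one_iff s sub (k + 1) hk1).mp h1)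
        (pvOccMono hpre hlt)
  · obtain ⟨hle, hpre, hmin⟩ := PySem.Chars.findFrom_natCast_spec s sub (k + 1) hk1 h1
    set j := PySem.Chars.findFrom s sub ((k + 1 : Nat) : Int) with hj
    have hj0 : 0 ≤ j := le_trans (Int.natCast_nonneg (k + 1)) hle
    have hjk : k ≤ j.toNat := by omega
    have hnz : PySem.Chars.findFrom s sub (k : Int) ≠ -1 := by
      intro hc
      exact ((PySem.Chars.findFrom_natCast_eq_neg_one_iff s sub k hkle).mp hc)
        (pvOccMono hpre hjk)
    obtain ⟨hle', hpre', hmin'⟩ := PySem.Chars.findFrom_natCast_spec s sub k hkle hnz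
    set j' := PySem.Chars.findFrom s sub (k : Int) with hj'
    have hj0' : 0 ≤ j' := le_trans (Int.natCast_nonneg k) hle'
    have hne : j'.toNat ≠ k := fun he => hnp (he ▸ hpre')
    have h1' : k + 1 ≤ j'.toNat := by omega
    have hle1 : j.toNat ≤ j'.toNat := by
      by_contra hc
      exact (hmin j'.toNat h1' (by omega)) hpre'
    have hle2 : j'.toNat ≤ j.toNat := by
      by_contra hc
      exact (hmin' j.toNat hjk (by omega)) hpre
    omega

-- searching from the end of the string finds nothing (nonempty pattern)
theorem pvFindEnd {s sub : List Char} (hne : sub ≠ []) :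
    PySem.Chars.findFrom s sub ((s.length : Nat) : Int) = -1 := by
  apply (PySem.Chars.findFrom_natCast_eq_neg_one_iff s sub s.length le_rfl).mpr
  simp only [List.drop_length]
  intro hinf
  exact hne (List.infix_nil.mp hinf)

-- one-step reduction lemmas for the state machine (the WF equation specialised per shape)
theorem pvScanNil (i state : Nat) (start : Int) (spans : List (Int × Int)) :
    scanB [] i state start spans =
      if state = 0 then spans else spans ++ [(start, (i : Int))] := by
  rw [scanB.eq_def]

theorem pvScanCode1 (c : Char) (i : Nat) (start : Int) (spans : List (Int × Int)) :
    scanB [c] i 0 start spans = scanB [] (i + 1) 0 start spans := by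
  rw [scanB.eq_def]; rfl

theorem pvScanCode2 (c d : Char) (rest : List Char) (i : Nat) (start : Int) (spans : List (Int × Int)) :
    scanB (c :: d :: rest) i 0 start spans =
      if c = '/' ∧ d = '/' then scanB rest (i + 2) 1 (i : Int) spans
      else if c = '/' ∧ d = '*' then scanB rest (i + 2) 2 (i : Int) spans
      else scanB (d :: rest) (i + 1) 0 start spans := by
  rw [scanB.eq_def]; rfl

theorem pvScanLineStep (c : Char) (rest : List Char) (i : Nat) (start : Int) (spans : List (Int × Int)) :
    scanB (c :: rest) i 1 start spans =
      if c = '\n' then scanB rest (i + 1) 0 start (spans ++ [(start, (i : Int))])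
      else scanB rest (i + 1) 1 start spans := by
  rw [scanB.eq_def]; rfl

theorem pvScanBlock1 (c : Char) (i : Nat) (start : Int) (spans : List (Int × Int)) :
    scanB [c] i 2 start spans = scanB [] (i + 1) 2 start spans := by
  rw [scanB.eq_def]; rfl

theorem pvScanBlock2 (c d : Char) (rest : List Char) (i : Nat) (start : Int) (spans : List (Int × Int)) :
    scanB (c :: d :: rest) i 2 start spans =
      if c = '*' ∧ d = '/' then scanB rest (i + 2) 0 start (spans ++ [(start, (i : Int) + 2)])
      else scanB (d :: rest) (i + 1) 2 start spans := by
  rw [scanB.eq_def]; rfl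

-- B in line-comment state: runs to the next '\n' (or the end), appends the span, resumes in code state
theorem pvScanLine (s : List Char) : ∀ (d k : Nat) (st : Int) (spans : List (Int × Int)),
    s.length - k ≤ d → k ≤ s.length →
    scanB (s.drop k) k 1 st spans =
      if PySem.Chars.findFrom s ['\n'] (k : Int) = -1 then
        spans ++ [(st, (s.length : Int))]
      else
        scanB (s.drop ((PySem.Chars.findFrom s ['\n'] (k : Int)).toNat + 1))
          ((PySem.Chars.findFrom s ['\n'] (k : Int)).toNat + 1) 0 st
          (spans ++ [(st, PySem.Chars.findFrom s ['\n'] (k : Int))]) := by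
  intro d
  induction d with
  | zero =>
    intro k st spans hd hkle
    have hk : k = s.length := by omega
    subst hk
    rw [pvFindEnd (by decide), if_pos rfl, List.drop_length, pvScanNil]
    simp
  | succ d ih =>
    intro k st spans hd hkle
    rcases Nat.eq_or_lt_of_le hkle with rfl | hk
    · rw [pvFindEnd (by decide), if_pos rfl, List.drop_length, pvScanNil]
      simp
    · rw [List.drop_eq_getElem_cons hk]
      by_cases hc : s[k] = '\n'
      · have hfind : PySem.Chars.findFrom s ['\n'] (k : Int) = (k : Int) :=
          pvFindAt (le_of_lt hk) (by decide) ((pvPref1Iff hk '\n').mpr hc)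
        rw [hfind, if_neg (by omega : ¬ (k : Int) = -1)]
        simp only [Int.toNat_natCast]
        rw [pvScanLineStep, if_pos hc]
      · rw [pvScanLineStep, if_neg hc,
          pvFindStep hk ((pvPref1Iff hk '\n').not.mpr hc)]
        exact ih (k + 1) st spans (by omega) hk

-- B in block-comment state: runs to the next "*/" (or the end), appends the span, resumes in code state
theorem pvScanBlockLemma (s : List Char) : ∀ (d k : Nat) (st : Int) (spans : List (Int × Int)),
    s.length - k ≤ d → k ≤ s.length →
    scanB (s.drop k) k 2 st spans =
      if PySem.Chars.findFrom s ['*', '/'] (k : Int) = -1 then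
        spans ++ [(st, (s.length : Int))]
      else
        scanB (s.drop ((PySem.Chars.findFrom s ['*', '/'] (k : Int)).toNat + 2))
          ((PySem.Chars.findFrom s ['*', '/'] (k : Int)).toNat + 2) 0 st
          (spans ++ [(st, PySem.Chars.findFrom s ['*', '/'] (k : Int) + 2)]) := by
  intro d
  induction d with
  | zero =>
    intro k st spans hd hkle
    have hk : k = s.length := by omega
    subst hk
    rw [pvFindEnd (by decide), if_pos rfl, List.drop_length, pvScanNil]
    simp
  | succ d ih =>
    intro k st spans hd hkle
    rcases Nat.eq_or_lt_of_le hkle with rfl | hk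
    · rw [pvFindEnd (by decide), if_pos rfl, List.drop_length, pvScanNil]
      simp
    · rw [List.drop_eq_getElem_cons hk]
      by_cases hk1 : k + 1 < s.length
      · rw [List.drop_eq_getElem_cons hk1]
        by_cases hm : s[k] = '*' ∧ s[k + 1] = '/'
        · have hfind : PySem.Chars.findFrom s ['*', '/'] (k : Int) = (k : Int) :=
            pvFindAt (le_of_lt hk) (by decide) ((pvPref2Iff hk1 '*' '/').mpr hm)
          rw [hfind, if_neg (by omega : ¬ (k : Int) = -1)]
          simp only [Int.toNat_natCast]
          rw [pvScanBlock2, if_pos hm]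
        · rw [pvScanBlock2, if_neg hm, ← List.drop_eq_getElem_cons hk1,
            pvFindStep hk ((pvPref2Iff hk1 '*' '/').not.mpr hm)]
          exact ih (k + 1) st spans (by omega) hk1.le
      · -- k is the last index: no "*/" fits at or after k
        have hlen : s.length = k + 1 := by omega
        have hnp : ¬ ['*', '/'] <+: s.drop k := fun h => by
          have := pvPref2Len h; omega
        rw [pvFindStep hk hnp,
          show ((k + 1 : Nat) : Int) = ((s.length : Nat) : Int) by rw [hlen],
          pvFindEnd (by decide), if_pos rfl]
        have hdrop : s.drop (k + 1) = [] := by rw [← hlen]; exact List.drop_length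
        rw [hdrop, pvScanBlock1, pvScanNil]
        simp [hlen]

-- main agreement: from any code-state position the state machine computes what A's loop computes
theorem pvMainLoop (s : List Char) : ∀ (d i : Nat) (st : Int) (spans : List (Int × Int)),
    s.length - i ≤ d → i ≤ s.length →
    scanB (s.drop i) i 0 st spans = buildLoopA s s.length i spans := by
  intro d
  induction d with
  | zero =>
    intro i st spans hd hile
    have : i = s.length := by omega
    subst this
    rw [List.drop_length, pvLoopATerm s _ _ spans le_rfl, pvScanNil]
    simp
  | succ d ih =>
    intro i st spans hd hile
    rcases Nat.eq_or_lt_of_le hile with rfl | hi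
    · rw [List.drop_length, pvLoopATerm s _ _ spans le_rfl, pvScanNil]
      simp
    · rw [pvLoopAUnfold (f := s.length) spans hi (by omega)]
      by_cases hsw1 : PySem.Chars.startswith (s.drop i) ['/', '/'] = true
      · -- line comment starts at i
        have hpre := (PySem.Chars.startswith_iff _ _).mp hsw1
        have hi1 : i + 1 < s.length := by have := pvPref2Len hpre; omega
        obtain ⟨hci, hci1⟩ := (pvPref2Iff hi1 '/' '/').mp hpre
        rw [if_pos hsw1, List.drop_eq_getElem_cons hi, List.drop_eq_getElem_cons hi1,
          pvScanCode2, if_pos (⟨hci, hci1⟩ : s[i] = '/' ∧ s[i + 1] = '/'),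
          show i + 1 + 1 = i + 2 from rfl]
        -- A's find from i agrees with B's find from i+2 (neither s[i] nor s[i+1] is '\n')
        have hfeq : PySem.Chars.findFrom s ['\n'] ((i + 2 : Nat) : Int) =
            PySem.Chars.findFrom s ['\n'] (i : Int) := by
          rw [pvFindStep hi ((pvPref1Iff hi '\n').not.mpr (by rw [hci]; decide)),
            pvFindStep hi1 ((pvPref1Iff hi1 '\n').not.mpr (by rw [hci1]; decide))]
        have hB := pvScanLine s (s.length - (i + 2)) (i + 2) (i : Int) spans le_rfl (by omega)
        rw [hfeq] at hB
        rw [hB]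
        by_cases hnone : PySem.Chars.findFrom s ['\n'] (i : Int) = -1
        · rw [if_pos hnone, if_pos hnone]
        · rw [if_neg hnone, if_neg hnone]
          set j := PySem.Chars.findFrom s ['\n'] (i : Int) with hjdef
          obtain ⟨hle, hpre', -⟩ :=
            PySem.Chars.findFrom_natCast_spec s ['\n'] i (le_of_lt hi) hnone
          have hj0 : 0 ≤ j := le_trans (Int.natCast_nonneg i) hle
          have hij : i ≤ j.toNat := by omega
          have hjn : j.toNat < s.length := pvPrefLtLen hpre'
          rw [pvLoopAUnfold (f := s.length) _ hjn (by omega),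
            if_neg (fun hc =>
              absurd (pvPrefHeadEq ((PySem.Chars.startswith_iff _ _).mp hc) hpre') (by decide)),
            if_neg (fun hc =>
              absurd (pvPrefHeadEq ((PySem.Chars.startswith_iff _ _).mp hc) hpre') (by decide))]
          exact ih (j.toNat + 1) (i : Int) (spans ++ [((i : Int), j)]) (by omega) (by omega)
      · by_cases hsw2 : PySem.Chars.startswith (s.drop i) ['/', '*'] = true
        · -- block comment starts at i
          have hpre := (PySem.Chars.startswith_iff _ _).mp hsw2
          have hi1 : i + 1 < s.length := by have := pvPref2Len hpre; omega
          obtain ⟨hci, hci1⟩ := (pvPref2Iff hi1 '/' '*').mp hpre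
          rw [if_neg hsw1, if_pos hsw2, List.drop_eq_getElem_cons hi,
            List.drop_eq_getElem_cons hi1, pvScanCode2,
            if_neg (fun hc : s[i] = '/' ∧ s[i + 1] = '/' => by
              rw [hci1] at hc; exact absurd hc.2 (by decide)),
            if_pos (⟨hci, hci1⟩ : s[i] = '/' ∧ s[i + 1] = '*'),
            show i + 1 + 1 = i + 2 from rfl]
          have hB := pvScanBlockLemma s (s.length - (i + 2)) (i + 2) (i : Int) spans le_rfl (by omega)
          rw [hB]
          have hcast : ((i : Int) + 2) = ((i + 2 : Nat) : Int) := by push_cast; ring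
          rw [hcast]
          by_cases hnone : PySem.Chars.findFrom s ['*', '/'] ((i + 2 : Nat) : Int) = -1
          · rw [if_pos hnone, if_pos hnone]
          · rw [if_neg hnone, if_neg hnone]
            set e := PySem.Chars.findFrom s ['*', '/'] ((i + 2 : Nat) : Int) with hedef
            obtain ⟨hle, hpre', -⟩ :=
              PySem.Chars.findFrom_natCast_spec s ['*', '/'] (i + 2) (by omega) hnone
            have he0 : 0 ≤ e := le_trans (Int.natCast_nonneg (i + 2)) hle
            have hie : i + 2 ≤ e.toNat := by omega
            have hcast2 : (e + 2).toNat = e.toNat + 2 := by omega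
            have hend : e.toNat + 2 ≤ s.length := pvPref2Len hpre'
            rw [hcast2]
            exact ih (e.toNat + 2) (i : Int) (spans ++ [((i : Int), e + 2)]) (by omega) (by omega)
        · -- no comment starts at i: both sides step one character
          rw [if_neg hsw1, if_neg hsw2, List.drop_eq_getElem_cons hi]
          cases hd1 : s.drop (i + 1) with
          | nil =>
            have hlen : s.length ≤ i + 1 := List.drop_eq_nil_iff.mp hd1
            rw [pvScanCode1, pvScanNil, pvLoopATerm s _ _ spans hlen]
            simp
          | cons d1 rest1 =>
            rw [pvScanCode2,
              if_neg (fun hc : s[i] = '/' ∧ d1 = '/' =>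
                hsw1 ((PySem.Chars.startswith_iff _ _).mpr
                  ⟨rest1, by rw [List.drop_eq_getElem_cons hi, hd1, hc.1, hc.2]; rfl⟩)),
              if_neg (fun hc : s[i] = '/' ∧ d1 = '*' =>
                hsw2 ((PySem.Chars.startswith_iff _ _).mpr
                  ⟨rest1, by rw [List.drop_eq_getElem_cons hi, hd1, hc.1, hc.2]; rfl⟩)),
              ← hd1]
            exact ih (i + 1) st spans (by omega) hi

theorem pvMainEq (text : String) :
    build_comment_spans text = build_comment_spans_alt text := by
  unfold build_comment_spans build_comment_spans_alt
  rw [← pvMainLoop text.toList text.toList.length 0 0 [] (by omega) (by omega)]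
  rfl

-- ===== VERDICT (by name: the statement is the Claim_ definition above) =====
theorem build_comment_spans_spec : Claim_equal_build_comment_spans := fun text _ => pvMainEq text
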